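-- pv_equiv track=rewrite | github.com/hasan-bakr/Data-Managment-and-Analyze-Codes | py/order_to_label_places.py | reorder_lines
-- ===== SOURCE A (Python) =====
-- from typing import Tuple, Iterable, List
--
-- def reorder_lines(lines: Iterable[str], target_class: int) -> str:
--     tops, rest = [], []
--     for orig in lines:
--         s = orig.strip()
--         if not s:
--             continue
--         parts = s.split()
--         try:
--             cls_id = int(parts[0])
--         except ValueError:
--             rest.append(s)
--             continue
--         (tops if cls_id == target_class else rest).append(s)
--     new_lines = tops + rest
--     return "\n".join(new_lines) + ("\n" if new_lines else "")
-- ===== SOURCE B (Python) =====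
-- def reorder_lines(lines, target_class):
--     # One pass tagging each kept line with whether it belongs to the target
--     # class, then a single stable sort brings target lines to the front.
--     records = []
--     for orig in lines:
--         s = orig.strip()
--         if not s:
--             continue
--         try:
--             is_target = int(s.split()[0]) == target_class
--         except ValueError:
--             is_target = False
--         records.append((s, is_target))
--     ordered = sorted(records, key=lambda r: 0 if r[1] else 1)
--     return "".join(s + "\n" for s, _ in ordered)
-- ===== Notes on version B (the rewrite author's own statement) =====
-- stated objective: alternative
-- what changed: B replaces A's explicit tops/rest two-accumulator partition by one tagging pass plus a single stable sort on the is-target flag, and builds the output as ''.join(line + '\n') instead of '\n'.join plus a conditional trailing newline.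
import Mathlib
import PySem

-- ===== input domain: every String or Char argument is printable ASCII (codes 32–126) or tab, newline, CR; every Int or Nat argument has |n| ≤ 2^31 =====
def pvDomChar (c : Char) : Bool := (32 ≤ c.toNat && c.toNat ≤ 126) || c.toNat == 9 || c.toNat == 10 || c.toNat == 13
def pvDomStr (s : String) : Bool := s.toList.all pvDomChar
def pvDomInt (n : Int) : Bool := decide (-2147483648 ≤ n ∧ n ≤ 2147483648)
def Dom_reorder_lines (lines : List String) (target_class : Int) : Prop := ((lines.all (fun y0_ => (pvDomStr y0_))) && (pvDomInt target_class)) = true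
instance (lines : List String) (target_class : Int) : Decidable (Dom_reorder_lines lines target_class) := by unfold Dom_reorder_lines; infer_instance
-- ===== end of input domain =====

-- B replaces A's explicit tops/rest partition by tagging each kept line and one
-- stable sort on the tag, joining "line + newline" pieces (objective: alternative).

-- ===== PORT A =====
-- loop body of A's for-loop (strip, skip empty, int(parts[0]) with the
-- ValueError路径 → rest, else tops iff cls_id == target_class);
-- parts[0] is `parts.headD ""` — parts is nonempty whenever s is nonempty,
-- so the IndexError case is unreachable.
def pvAStep (target_class : Int) (acc : List String × List String) (orig : String) :
    List String × List String :=
  let s := PySem.Str.strip orig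
  if s == "" then acc
  else
    let parts := PySem.Str.split₀ s
    match PySem.Int.ofStr? (parts.headD "") with
    | none => (acc.1, acc.2 ++ [s])
    | some cls_id =>
        if cls_id == target_class then (acc.1 ++ [s], acc.2) else (acc.1, acc.2 ++ [s])

def reorder_lines (lines : List String) (target_class : Int) : String :=
  let tr := lines.foldl (pvAStep target_class) ([], [])
  let new_lines := tr.1 ++ tr.2
  -- Python string `+` ported as "".join([·,·]) (exact)
  PySem.Str.join "" [PySem.Str.join "\n" new_lines, if new_lines.isEmpty then "" else "\n"]

-- ===== PORT B =====
-- loop body of B's record-building pass: tag each kept stripped line with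
-- whether its class id equals target_class (ValueError → not target).
def pvBStep (target_class : Int) (acc : List (String × Bool)) (orig : String) :
    List (String × Bool) :=
  let s := PySem.Str.strip orig
  if s == "" then acc
  else
    let is_target :=
      match PySem.Int.ofStr? ((PySem.Str.split₀ s).headD "") with
      | some n => n == target_class
      | none => false
    acc ++ [(s, is_target)]

def reorder_lines_alt (lines : List String) (target_class : Int) : String :=
  let records := lines.foldl (pvBStep target_class) []
  let ordered := PySem.List.sorted records (fun r => if r.2 then (0 : Int) else 1)
  -- "".join(s + "\n" for s, _ in ordered); `s + "\n"` ported as "".join([s, "\n"]) (exact)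
  PySem.Str.join "" (ordered.map (fun r => PySem.Str.join "" [r.1, "\n"]))

-- ===== PRECONDITION & SPEC =====
def Spec_reorder_lines (lines : List String) (target_class : Int) (out : String) : Prop := out = reorder_lines_alt lines target_class
instance (lines : List String) (target_class : Int) (out : String) : Decidable (Spec_reorder_lines lines target_class out) := by unfold Spec_reorder_lines; infer_instance

-- ===== CLAIM (what is proved, stated in full; the proofs are below) =====
def Claim_equal_reorder_lines : Prop := ∀ (lines : List String) (target_class : Int), Dom_reorder_lines lines target_class → Spec_reorder_lines lines target_class (reorder_lines lines target_class)

-- ===== LEMMAS AND PROOFS =====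

-- one loop step: A's pair of accumulators is recovered from B's record list
theorem pv_step (target_class : Int) (acc : List (String × Bool)) (l : String) :
    pvAStep target_class
        ((acc.filter (·.2)).map (·.1), (acc.filter (fun r => !r.2)).map (·.1)) l
      = (((pvBStep target_class acc l).filter (·.2)).map (·.1),
         ((pvBStep target_class acc l).filter (fun r => !r.2)).map (·.1)) := by
  unfold pvAStep pvBStep
  dsimp only [letFun]
  cases hq : PySem.Int.ofStr? ((PySem.Str.split₀ (PySem.Str.strip l)).headD "") with
  | none =>
    by_cases h : PySem.Str.strip l == ""
    · simp only [h, if_true]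
    · simp only [h, Bool.false_eq_true, if_false, List.filter_append, List.map_append]
      simp
  | some n =>
    by_cases h : PySem.Str.strip l == ""
    · simp only [h, if_true]
    · by_cases hn : n == target_class
      · simp only [h, Bool.false_eq_true, if_false, hn, if_true, List.filter_append,
          List.map_append]
        simp
      · simp only [h, Bool.false_eq_true, if_false, hn, if_false, List.filter_append,
          List.map_append]
        simp

-- the whole loop: A's fold state is B's record list filtered on the tag
theorem pv_fold_inv (target_class : Int) :
    ∀ (lines : List String) (acc : List (String × Bool)),
      lines.foldl (pvAStep target_class)
        ((acc.filter (·.2)).map (·.1), (acc.filter (fun r => !r.2)).map (·.1))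
      = (((lines.foldl (pvBStep target_class) acc).filter (·.2)).map (·.1),
         ((lines.foldl (pvBStep target_class) acc).filter (fun r => !r.2)).map (·.1)) := by
  intro lines
  induction lines with
  | nil => intro acc; rfl
  | cons l ls ih =>
    intro acc
    simp only [List.foldl_cons]
    rw [pv_step, ih]

-- inserting into zs ++ os (all tags in zs true, all in os false) lands at the
-- end of its own block: the stable sort on the tag IS the partition
theorem pv_insert_part (x : String × Bool) :
    ∀ (zs os : List (String × Bool)), (∀ z ∈ zs, z.2 = true) → (∀ o ∈ os, o.2 = false) →
      PySem.List.insertBy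
        (fun a b => decide ((if a.2 then (0:Int) else 1) < (if b.2 then (0:Int) else 1)))
        x (zs ++ os)
      = if x.2 then (zs ++ [x]) ++ os else zs ++ (os ++ [x]) := by
  intro zs os hz ho
  by_cases hx : x.2
  · simp only [hx, if_pos]
    induction zs with
    | nil =>
      simp only [List.nil_append]
      cases os with
      | nil => simp [PySem.List.insertBy]
      | cons o os' =>
        have : o.2 = false := ho o (by simp)
        simp [PySem.List.insertBy, hx, this]
    | cons z zs' ihz =>
      have hz2 : z.2 = true := hz z (by simp)
      simp only [List.cons_append, PySem.List.insertBy, hx, hz2]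
      simp only [lt_self_iff_false, decide_false, Bool.false_eq_true, if_false]
      rw [ihz (fun a ha => hz a (by simp [ha]))]
  · simp only [hx, if_neg, Bool.false_eq_true, not_false_eq_true]
    rw [PySem.List.insertBy_of_forall_not_before _ _ _ ?_, List.append_assoc]
    intro y hy
    simp only [Bool.not_eq_true] at hx
    rcases List.mem_append.mp hy with h | h
    · simp [hx, hz y h]
    · simp [hx, ho y h]

theorem pv_foldl_insert (rs : List (String × Bool)) :
    ∀ (zs os : List (String × Bool)), (∀ z ∈ zs, z.2 = true) → (∀ o ∈ os, o.2 = false) →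
      rs.foldl (fun acc x =>
          PySem.List.insertBy
            (fun a b => decide ((if a.2 then (0:Int) else 1) < (if b.2 then (0:Int) else 1)))
            x acc) (zs ++ os)
      = (zs ++ rs.filter (·.2)) ++ (os ++ rs.filter (fun r => !r.2)) := by
  induction rs with
  | nil => intro zs os _ _; simp
  | cons r rs' ih =>
    intro zs os hz ho
    simp only [List.foldl_cons]
    rw [pv_insert_part r zs os hz ho]
    by_cases hr : r.2
    · simp only [hr, if_pos]
      rw [ih (zs ++ [r]) os ?_ ho]
      · simp [hr, List.append_assoc]
      · intro z hzm
        rcases List.mem_append.mp hzm with h | h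
        · exact hz z h
        · simp only [List.mem_singleton] at h; rw [h]; exact hr
    · simp only [hr, if_neg, Bool.false_eq_true, not_false_eq_true]
      rw [ih zs (os ++ [r]) hz ?_]
      · simp only [Bool.not_eq_true] at hr
        simp [hr, List.append_assoc]
      · intro o hom
        rcases List.mem_append.mp hom with h | h
        · exact ho o h
        · simp only [List.mem_singleton] at h; rw [h]
          simpa using hr

theorem pv_sorted_part (rs : List (String × Bool)) :
    PySem.List.sorted rs (fun r => if r.2 then (0 : Int) else 1)
      = rs.filter (·.2) ++ rs.filter (fun r => !r.2) := by
  rw [PySem.List.sorted_eq_foldl_insertBy]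
  have := pv_foldl_insert rs [] [] (by simp) (by simp)
  simpa using this

-- "".join(x + "\n" for x in xs) = "\n".join(xs) + ("\n" iff xs is nonempty)
theorem pv_chars_join (xs : List (List Char)) :
    PySem.Chars.join [] (xs.map (fun c => c ++ ['\n']))
      = PySem.Chars.join ['\n'] xs ++ (if xs.isEmpty then [] else ['\n']) := by
  induction xs with
  | nil => simp [PySem.Chars.join, List.intercalate]
  | cons x xs' ih =>
    cases xs' with
    | nil => simp [PySem.Chars.join, List.intercalate]
    | cons y t =>
      have hcc : ∀ (sep a b : List Char) (ts : List (List Char)),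
          List.intercalate sep (a :: b :: ts) = a ++ sep ++ List.intercalate sep (b :: ts) := by
        intro sep a b ts
        simp [List.intercalate, List.intersperse]
      simp only [PySem.Chars.join, List.map_cons] at ih ⊢
      rw [hcc, hcc]
      simp only [List.isEmpty_cons] at ih ⊢
      simp [ih, List.append_assoc]

theorem pv_main (lines : List String) (target_class : Int) :
    reorder_lines lines target_class = reorder_lines_alt lines target_class := by
  simp only [reorder_lines, reorder_lines_alt]
  have hfold := pv_fold_inv target_class lines []
  simp only [List.filter_nil, List.map_nil] at hfold
  rw [hfold, pv_sorted_part]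
  set ord := (lines.foldl (pvBStep target_class) []).filter (·.2)
      ++ (lines.foldl (pvBStep target_class) []).filter (fun r => !r.2) with hord
  have hnl : ((lines.foldl (pvBStep target_class) []).filter (·.2)).map (·.1)
      ++ ((lines.foldl (pvBStep target_class) []).filter (fun r => !r.2)).map (·.1)
      = ord.map (·.1) := by simp [hord]
  rw [hnl]
  apply String.toList_inj.mp
  rw [PySem.Str.toList_join, PySem.Str.toList_join]
  have h2 : ∀ a b : List Char, PySem.Chars.join [] [a, b] = a ++ b := by
    intro a b; simp [PySem.Chars.join, List.intercalate, List.intersperse]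
  have hmap : List.map String.toList (ord.map (fun r => PySem.Str.join "" [r.1, "\n"]))
      = (ord.map (fun r => r.1.toList)).map (fun c => c ++ ['\n']) := by
    simp only [List.map_map]
    apply List.map_congr_left
    intro r _
    simp only [Function.comp, PySem.Str.toList_join, List.map_cons, List.map_nil]
    rw [show ("" : String).toList = [] from rfl, show ("\n" : String).toList = ['\n'] from rfl]
    exact h2 _ _
  rw [show ("" : String).toList = [] from rfl, hmap, pv_chars_join,
    List.map_cons, List.map_cons, List.map_nil, h2]
  congr 1
  · rw [PySem.Str.toList_join, show ("\n" : String).toList = ['\n'] from rfl, List.map_map]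
    rfl
  · cases hc : ord with
    | nil => simp
    | cons r t => simp

-- ===== VERDICT (by name: the statement is the Claim_ definition above) =====
theorem reorder_lines_spec : Claim_equal_reorder_lines := by
  intro lines target_class _
  unfold Spec_reorder_lines
  exact pv_main lines target_class
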